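-- pv_equiv track=rewrite | github.com/victor-kowalski-m/merc4d0 | compras/funcoes.py | check
-- ===== SOURCE A (Python) =====
-- def check(number):
--     sum = 0
--     m = 1
--
--     # Iterates through number string backwards
--     for i in reversed(number):
--         sum += (int(i) * m) // 10 + (int(i) * m) % 10
--
--         # Changes multiplier value for next iteration
--         if m == 1:
--             m = 2
--         else:
--             m = 1
--
--     if sum % 10 != 0:
--         return "INVALID"
--
--     elif number[0] == '4' and len(number) in [13,16]:
--         return "VISA"
--
--     elif number[:2] in ['34', '37']  and len(number) == 15:
--         return "AMEX"
--
--     elif number[:2] in ['51', '52', '53', '54', '55']  and len(number) == 16: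
--         return "MASTERCARD"
--
--     return "INVALID"
-- ===== SOURCE B (Python) =====
-- def _corr(rev):
--     # correction added for the digits Luhn doubles (odd indices of the reversed digits):
--     # doubling-and-folding d contributes d extra if d < 5, else d - 9 extra
--     if len(rev) < 2:
--         return 0
--     d = rev[1]
--     return (d if d < 5 else d - 9) + _corr(rev[2:])
--
--
-- BRANDS = (
--     ("VISA", ("4",), (13, 16)),
--     ("AMEX", ("34", "37"), (15,)),
--     ("MASTERCARD", ("51", "52", "53", "54", "55"), (16,)),
-- )
--
--
-- def check(number):
--     digits = [int(c) for c in number]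
--     total = sum(digits) + _corr(digits[::-1])
--     if total % 10 != 0:
--         return "INVALID"
--     for brand, prefixes, lengths in BRANDS:
--         if len(number) in lengths and any(number.startswith(p) for p in prefixes):
--             return brand
--     return "INVALID"
-- ===== Notes on version B (the rewrite author's own statement) =====
-- stated objective: alternative
-- what changed: The checksum becomes sum(all digits) plus a recursively computed correction (d if d<5 else d-9) for the doubled positions instead of A's stateful reversed loop with a toggling multiplier and //10+%10 fold, and the if-chain classification becomes a data-table loop over (brand, prefixes, lengths).
import Mathlib
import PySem

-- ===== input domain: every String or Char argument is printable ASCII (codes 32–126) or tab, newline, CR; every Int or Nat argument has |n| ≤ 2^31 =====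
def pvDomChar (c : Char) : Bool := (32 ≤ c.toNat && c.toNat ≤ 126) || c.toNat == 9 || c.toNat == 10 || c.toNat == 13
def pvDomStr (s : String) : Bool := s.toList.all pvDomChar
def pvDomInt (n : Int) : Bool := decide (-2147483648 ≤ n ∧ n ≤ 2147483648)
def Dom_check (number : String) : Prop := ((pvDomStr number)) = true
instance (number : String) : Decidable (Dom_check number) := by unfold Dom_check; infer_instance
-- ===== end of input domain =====

-- B computes the checksum as sum-of-digits plus a recursive correction for the doubled
-- positions (instead of A's toggling-multiplier loop) and classifies via a brand table;
-- same return value on every all-digit input (Pre_).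


-- ===== PORT A =====
-- int(i) for the single character i; Pre_ guarantees i is a digit so int() returns
def pyDigit (c : Char) : Int := (PySem.Int.ofChars? [c]).getD 0

def check (number : String) : String :=
  let cs := number.toList
  -- for i in reversed(number): sum += (int(i)*m)//10 + (int(i)*m)%10 ; toggle m
  let p := cs.reverse.foldl (fun (st : Int × Int) i =>
      (st.1 + (PySem.Int.floordiv (pyDigit i * st.2) 10 + PySem.Int.mod (pyDigit i * st.2) 10),
       if st.2 = 1 then 2 else 1)) ((0 : Int), (1 : Int))
  if PySem.Int.mod p.1 10 ≠ 0 then "INVALID"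
  else if PySem.List.pyGetD cs 0 ' ' = '4' ∧ (cs.length = 13 ∨ cs.length = 16) then "VISA"
  else if (PySem.List.slice cs none (some 2) = ['3','4'] ∨ PySem.List.slice cs none (some 2) = ['3','7']) ∧ cs.length = 15 then "AMEX"
  else if (PySem.List.slice cs none (some 2) = ['5','1'] ∨ PySem.List.slice cs none (some 2) = ['5','2'] ∨ PySem.List.slice cs none (some 2) = ['5','3'] ∨ PySem.List.slice cs none (some 2) = ['5','4'] ∨ PySem.List.slice cs none (some 2) = ['5','5']) ∧ cs.length = 16 then "MASTERCARD"
  else "INVALID"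

-- ===== PORT B =====
-- _corr of Source B: correction for the doubled (odd) positions of the reversed digit list
def corrRec : List Int → Int
  | [] => 0
  | [_] => 0
  | _ :: d :: t => (if d < 5 then d else d - 9) + corrRec t

-- BRANDS of Source B (prefixes as char lists, lengths as ints)
def pvBrands : List (String × List (List Char) × List Int) :=
  [("VISA", [['4']], [13, 16]),
   ("AMEX", [['3','4'], ['3','7']], [15]),
   ("MASTERCARD", [['5','1'], ['5','2'], ['5','3'], ['5','4'], ['5','5']], [16])]

-- the classification loop of Source B: first brand whose lengths and prefixes match
def classify (cs : List Char) : List (String × List (List Char) × List Int) → String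
  | [] => "INVALID"
  | (brand, prefixes, lengths) :: rest =>
      if (cs.length : Int) ∈ lengths ∧ prefixes.any (fun p => p.isPrefixOf cs) then brand
      else classify cs rest

def check_alt (number : String) : String :=
  let cs := number.toList
  let digits := cs.map pyDigit
  -- digits[::-1]
  let rev := (PySem.List.slice? digits none none (-1)).getD []
  let total := digits.sum + corrRec rev
  if PySem.Int.mod total 10 ≠ 0 then "INVALID"
  else classify cs pvBrands

-- ===== PRECONDITION & SPEC =====
-- Pre_ excludes exactly the inputs on which A raises: a non-digit character (ValueError from
-- int(i)) or the empty string (IndexError from number[0] after sum = 0).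
def Pre_check (number : String) : Prop := PySem.Str.strIsdigit number = true
instance (number : String) : Decidable (Pre_check number) := by unfold Pre_check; infer_instance
def pvWitness_check : String := "059"

def Spec_check (number : String) (out : String) : Prop := out = check_alt number
instance (number : String) (out : String) : Decidable (Spec_check number out) := by unfold Spec_check; infer_instance

-- ===== CLAIM (what is proved, stated in full; the proofs are below) =====
def Claim_equal_check : Prop := ∀ (number : String), Dom_check number → Pre_check number → Spec_check number (check number)

-- ===== LEMMAS AND PROOFS =====

-- proof-side characterisation of A's loop: the Luhn sum of a reversed digit list, two at a time
def luhnAlt : List Int → Int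
  | [] => 0
  | [d] => d
  | d :: e :: t => d + (PySem.Int.floordiv (e * 2) 10 + PySem.Int.mod (e * 2) 10) + luhnAlt t

lemma digit_bounds (c : Char) (h : PySem.Chars.isdigit c = true) :
    0 ≤ pyDigit c ∧ pyDigit c < 10 := by
  simp only [PySem.Chars.isdigit, Bool.and_eq_true, decide_eq_true_eq] at h
  have hm : c ∈ ['0','1','2','3','4','5','6','7','8','9'] := by
    have h1 : 48 ≤ c.toNat := h.1
    have h2 : c.toNat ≤ 57 := h.2
    have hc : c = Char.ofNat c.toNat := (Char.ofNat_toNat c).symm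
    interval_cases h3 : c.toNat <;> simp_all
  fin_cases hm <;> decide

lemma fd_self (d : Int) (h0 : 0 ≤ d) (h1 : d < 10) :
    PySem.Int.floordiv (d * 1) 10 + PySem.Int.mod (d * 1) 10 = d := by
  rw [PySem.Int.floordiv_eq_ediv_of_pos (by norm_num), PySem.Int.mod_eq_emod_of_pos (by norm_num)]
  omega

lemma fd_double (d : Int) (h0 : 0 ≤ d) (h1 : d < 10) :
    PySem.Int.floordiv (d * 2) 10 + PySem.Int.mod (d * 2) 10 = d + (if d < 5 then d else d - 9) := by
  rw [PySem.Int.floordiv_eq_ediv_of_pos (by norm_num), PySem.Int.mod_eq_emod_of_pos (by norm_num)]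
  split_ifs <;> omega

-- A's fold equals luhnAlt
lemma foldA_eq (rs : List Int) (h : ∀ d ∈ rs, 0 ≤ d ∧ d < 10) (s : Int) :
    (rs.foldl (fun (st : Int × Int) d =>
      (st.1 + (PySem.Int.floordiv (d * st.2) 10 + PySem.Int.mod (d * st.2) 10),
       if st.2 = 1 then 2 else 1)) (s, 1)).1 = s + luhnAlt rs := by
  induction rs using luhnAlt.induct generalizing s with
  | case1 => simp [luhnAlt]
  | case2 d =>
    obtain ⟨h0, h1⟩ := h d (by simp)
    simp only [List.foldl, luhnAlt, reduceIte]
    rw [fd_self d h0 h1]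
  | case3 d e t ih =>
    obtain ⟨h0, h1⟩ := h d (by simp)
    simp only [List.foldl, reduceIte]
    have h21 : (if (2:Int) = 1 then (2:Int) else 1) = 1 := by norm_num
    rw [h21, ih (fun x hx => h x (by simp [hx])), fd_self d h0 h1, luhnAlt]
    ring

-- B's sum + correction equals luhnAlt
lemma sum_corr_eq (rs : List Int) (h : ∀ d ∈ rs, 0 ≤ d ∧ d < 10) :
    rs.sum + corrRec rs = luhnAlt rs := by
  induction rs using luhnAlt.induct with
  | case1 => simp [luhnAlt, corrRec]
  | case2 d => simp [luhnAlt, corrRec]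
  | case3 d e t ih =>
    obtain ⟨h0, h1⟩ := h e (by simp)
    rw [luhnAlt, corrRec, fd_double e h0 h1, List.sum_cons, List.sum_cons,
        ← ih (fun x hx => h x (by simp [hx]))]
    ring

-- B's classification table loop equals A's if-chain, for a nonempty char list
lemma classify_eq (cs : List Char) (hne : cs ≠ []) :
    classify cs pvBrands =
      (if PySem.List.pyGetD cs 0 ' ' = '4' ∧ (cs.length = 13 ∨ cs.length = 16) then "VISA"
       else if (PySem.List.slice cs none (some 2) = ['3','4'] ∨ PySem.List.slice cs none (some 2) = ['3','7']) ∧ cs.length = 15 then "AMEX"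
       else if (PySem.List.slice cs none (some 2) = ['5','1'] ∨ PySem.List.slice cs none (some 2) = ['5','2'] ∨ PySem.List.slice cs none (some 2) = ['5','3'] ∨ PySem.List.slice cs none (some 2) = ['5','4'] ∨ PySem.List.slice cs none (some 2) = ['5','5']) ∧ cs.length = 16 then "MASTERCARD"
       else "INVALID") := by
  match cs, hne with
  | [c], _ =>
    simp [classify, pvBrands, PySem.List.pyGetD, PySem.List.pyGet?, PySem.List.pyIdx?,
          PySem.List.slice, List.isPrefixOf, and_comm]
  | c1 :: c2 :: t, _ =>
    have hs2 : PySem.List.slice (c1 :: c2 :: t) none (some 2) = [c1, c2] := by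
      simp [pysem, List.take]
    simp only [classify, pvBrands, hs2, PySem.List.pyGetD, PySem.List.pyGet?,
      PySem.List.pyIdx?]
    simp only [List.any_cons, List.any_nil, List.isPrefixOf, List.mem_cons, List.length_cons, Bool.or_eq_true, Bool.and_eq_true, beq_iff_eq,
      Bool.or_false, List.cons.injEq, List.not_mem_nil, or_false]
    by_cases h13 : t.length = 11 <;> by_cases h15 : t.length = 13 <;>
      by_cases h16 : t.length = 14 <;>
      simp_all [eq_comm, and_comm, or_comm] <;>
      first
        | omega
        | rw [if_neg (fun h => absurd h.2 (by omega)), if_neg (fun h => absurd h.2 (by omega)),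
              if_neg (fun h => absurd h.2 (by omega))]

-- ===== VERDICT (by name: the statement is the Claim_ definition above) =====
theorem check_spec : Claim_equal_check := by
  intro number _ hpre
  have hpre' := hpre
  simp only [Pre_check, PySem.Str.strIsdigit, PySem.Chars.strIsdigit, Bool.and_eq_true,
    List.all_eq_true] at hpre'
  obtain ⟨hne, hdig⟩ := hpre'
  have hbnd : ∀ d ∈ number.toList.map pyDigit, 0 ≤ d ∧ d < 10 := by
    intro d hd
    obtain ⟨c, hc, rfl⟩ := List.mem_map.1 hd
    exact digit_bounds c (hdig c hc)
  have hbndr : ∀ d ∈ (number.toList.map pyDigit).reverse, 0 ≤ d ∧ d < 10 := by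
    intro d hd; exact hbnd d (List.mem_reverse.1 hd)
  show check number = check_alt number
  unfold check check_alt
  simp only [PySem.List.slice?_none_none_neg_one, Option.getD_some]
  have hfold : ((number.toList.reverse.foldl (fun (st : Int × Int) i =>
      (st.1 + (PySem.Int.floordiv (pyDigit i * st.2) 10 + PySem.Int.mod (pyDigit i * st.2) 10),
       if st.2 = 1 then 2 else 1)) ((0 : Int), (1 : Int))).1 : Int) =
      luhnAlt ((number.toList.map pyDigit).reverse) := by
    have h := foldA_eq ((number.toList.map pyDigit).reverse) hbndr 0
    rw [← List.map_reverse, List.foldl_map] at h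
    simpa [List.map_reverse] using h
  have hsum : (number.toList.map pyDigit).sum + corrRec ((number.toList.map pyDigit).reverse) =
      luhnAlt ((number.toList.map pyDigit).reverse) := by
    rw [← List.sum_reverse]
    exact sum_corr_eq _ hbndr
  rw [hfold, ← hsum, classify_eq _ (by simpa using hne)]
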